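-- pv_equiv track=rewrite | github.com/aganashcse/kodewalk | scripts/ganeshganesha007@gmail.com/5dfe2d80f8bc4761ff9d4b56.py | rev_alpha_numeric
-- ===== SOURCE A (Python) =====
-- def rev_alpha_numeric(input_string):
--
--     #on to you now
--
--     res = ""
--
--     rev = input_string[::-1]
--
--     s_indx = 0
--
--     for indx in range(0,len(input_string)):
--
--         if not input_string[indx].isalnum():
--
--             res = res+input_string[indx]
--
--         else:
--
--             if rev[s_indx].isalnum():
--
--                 res = res+rev[s_indx]
--
--                 s_indx+=1
--
--             else:
--
--                 for ss in range(s_indx, len(input_string)):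
--
--                     s_indx+=1
--
--                     if rev[ss].isalnum():
--
--                         res = res+rev[ss]
--
--                         break
--
--     return res
-- ===== SOURCE B (Python) =====
-- def rev_alpha_numeric(input_string):
--     it = iter([c for c in input_string if c.isalnum()][::-1])
--     return ''.join(next(it) if c.isalnum() else c for c in input_string)
-- ===== Notes on version B (the rewrite author's own statement) =====
-- stated objective: simpler
-- what changed: B extracts the alphanumeric characters once, reverses that list, and fills alnum positions from it in a single pass, replacing A's index-juggling over the reversed string with its nested skip-forward inner loop.
import Mathlib
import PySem

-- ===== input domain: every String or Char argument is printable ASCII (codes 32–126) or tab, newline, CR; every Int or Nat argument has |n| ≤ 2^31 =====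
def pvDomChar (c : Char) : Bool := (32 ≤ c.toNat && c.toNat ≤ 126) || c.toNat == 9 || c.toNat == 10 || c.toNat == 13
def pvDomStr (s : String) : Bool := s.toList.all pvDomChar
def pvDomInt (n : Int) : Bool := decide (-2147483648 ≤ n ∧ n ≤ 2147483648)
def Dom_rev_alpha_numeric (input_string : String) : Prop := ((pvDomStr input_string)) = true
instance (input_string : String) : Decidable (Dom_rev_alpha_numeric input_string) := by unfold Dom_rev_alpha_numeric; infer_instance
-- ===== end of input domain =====

-- B replaces A's reversed-string index juggling (with its nested skip-forward loop) by
-- extract-the-alnums-once, reverse, and fill in a single pass; objective: simpler.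

-- ===== PORT A =====
-- inner 'for ss in range(s_indx, len(input_string)): s_indx += 1; if rev[ss].isalnum(): res += rev[ss]; break'
def pvInnerA (rev : List Char) : List Int → Nat → List Char → List Char × Nat
  | [], sIdx, res => (res, sIdx)
  | ss :: rest, sIdx, res =>
      if PySem.Chars.isalnum (PySem.List.pyGetD rev ss ' ')      -- rev[ss] (always in range here)
      then (res ++ [PySem.List.pyGetD rev ss ' '], sIdx + 1)
      else pvInnerA rev rest (sIdx + 1) res

-- outer 'for indx in range(0, len(input_string)): …' with state (res, s_indx)
def pvOuterA (l rev : List Char) : List Int → Nat → List Char → List Char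
  | [], _, res => res
  | indx :: rest, sIdx, res =>
      if ¬ PySem.Chars.isalnum (PySem.List.pyGetD l indx ' ')    -- input_string[indx]
      then pvOuterA l rev rest sIdx (res ++ [PySem.List.pyGetD l indx ' '])
      else if PySem.Chars.isalnum (PySem.List.pyGetD rev (sIdx : Int) ' ')   -- rev[s_indx]
      then pvOuterA l rev rest (sIdx + 1) (res ++ [PySem.List.pyGetD rev (sIdx : Int) ' '])
      else
        match pvInnerA rev (PySem.List.pyRange (sIdx : Int) ((l.length : Nat) : Int) 1) sIdx res with
        | (res', sIdx') => pvOuterA l rev rest sIdx' res'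

def rev_alpha_numeric (input_string : String) : String :=
  let l := input_string.toList
  let rev := (PySem.List.slice? l none none (-1)).getD []       -- input_string[::-1] (step ≠ 0, never none)
  String.ofList (pvOuterA l rev (PySem.List.pyRange 0 (PySem.Str.len input_string) 1) 0 [])

-- ===== PORT B =====
-- ''.join(next(it) if c.isalnum() else c for c in input_string), it = iter(reversed alnums);
-- the [] fallback is where Python's next(it) would raise StopIteration (unreachable: counts match)
def pvFill : List Char → List Char → List Char
  | [], _ => []
  | c :: cs, rs =>
      if PySem.Chars.isalnum c then
        match rs with
        | r :: rs' => r :: pvFill cs rs'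
        | [] => []
      else c :: pvFill cs rs

def rev_alpha_numeric_alt (input_string : String) : String :=
  String.ofList (pvFill input_string.toList ((input_string.toList.filter PySem.Chars.isalnum).reverse))

-- ===== PRECONDITION & SPEC =====
def Spec_rev_alpha_numeric (input_string : String) (out : String) : Prop := out = rev_alpha_numeric_alt input_string
instance (input_string : String) (out : String) : Decidable (Spec_rev_alpha_numeric input_string out) := by unfold Spec_rev_alpha_numeric; infer_instance

-- ===== CLAIM (what is proved, stated in full; the proofs are below) =====
def Claim_equal_rev_alpha_numeric : Prop := ∀ (input_string : String), Dom_rev_alpha_numeric input_string → Spec_rev_alpha_numeric input_string (rev_alpha_numeric input_string)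

-- ===== LEMMAS AND PROOFS =====

-- the inner skip-forward loop emits the next alnum char of rev at/after position k and lands just past it
theorem pvInnerA_spec (rev : List Char) (k : Nat) (res : List Char) (r : Char) (rs' : List Char)
    (h : (rev.drop k).filter PySem.Chars.isalnum = r :: rs') :
    ∃ k', pvInnerA rev (PySem.List.pyRange (k : Int) ((rev.length : Nat) : Int) 1) k res
            = (res ++ [r], k')
          ∧ (rev.drop k').filter PySem.Chars.isalnum = rs' := by
  have hk : k < rev.length := by
    by_contra hge
    rw [List.drop_eq_nil_of_le (by omega)] at h
    simp at h
  rw [PySem.List.pyRange_one_cons (by exact_mod_cast hk)]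
  have hdrop : rev.drop k = rev[k] :: rev.drop (k + 1) := List.drop_eq_getElem_cons hk
  rw [hdrop, List.filter_cons] at h
  have hget : PySem.List.pyGetD rev (k : Int) ' ' = rev[k] := by
    simp [PySem.List.pyGetD_natCast, List.getD_eq_getElem?_getD, hk]
  by_cases hal : PySem.Chars.isalnum rev[k]
  · simp only [hal, if_pos] at h
    obtain ⟨rfl, rfl⟩ : r = rev[k] ∧ rs' = (rev.drop (k + 1)).filter PySem.Chars.isalnum := by
      constructor <;> [exact (List.cons.injEq _ _ _ _ ▸ h).1.symm;
        exact ((List.cons.injEq _ _ _ _ ▸ h).2).symm]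
    exact ⟨k + 1, by simp [pvInnerA, hget, hal], rfl⟩
  · simp only [hal, if_neg, Bool.false_eq_true, not_false_iff] at h
    have hrec := pvInnerA_spec rev (k + 1) res r rs' h
    obtain ⟨k', hk', hf⟩ := hrec
    refine ⟨k', ?_, hf⟩
    have hcast : ((k : Int) + 1) = ((k + 1 : Nat) : Int) := by push_cast; ring
    simp only [pvInnerA, hget, hal, Bool.false_eq_true, if_false, hcast]
    exact hk'
termination_by rev.length - k
decreasing_by
  have hk : k < rev.length := by
    by_contra hge
    rw [List.drop_eq_nil_of_le (by omega)] at h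
    simp at h
  exact Nat.sub_lt_sub_left hk (Nat.lt_succ_self k)

-- outer-loop invariant: A's remaining run equals B's single-pass fill on the remaining suffixes
theorem pvOuterA_spec (l rev : List Char) (hlen : rev.length = l.length) :
    ∀ (i k : Nat) (res : List Char), i ≤ l.length →
    ((rev.drop k).filter PySem.Chars.isalnum).length
      = ((l.drop i).filter PySem.Chars.isalnum).length →
    pvOuterA l rev (PySem.List.pyRange (i : Int) ((l.length : Nat) : Int) 1) k res
      = res ++ pvFill (l.drop i) ((rev.drop k).filter PySem.Chars.isalnum) := by
  intro i k res hi hcnt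
  rcases Nat.lt_or_ge i l.length with hlt | hge
  · rw [PySem.List.pyRange_one_cons (by exact_mod_cast hlt)]
    have hdropl : l.drop i = l[i] :: l.drop (i + 1) := List.drop_eq_getElem_cons hlt
    have hgetl : PySem.List.pyGetD l (i : Int) ' ' = l[i] := by
      simp [PySem.List.pyGetD_natCast, List.getD_eq_getElem?_getD, hlt]
    have hcast : ((i : Int) + 1) = ((i + 1 : Nat) : Int) := by push_cast; ring
    by_cases hc : PySem.Chars.isalnum l[i]
    · -- alnum position: the remaining rev-alnum stream is nonempty
      rw [hdropl, List.filter_cons, if_pos hc] at hcnt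
      obtain ⟨r, rs', hs⟩ : ∃ r rs', (rev.drop k).filter PySem.Chars.isalnum = r :: rs' := by
        rcases hrs : (rev.drop k).filter PySem.Chars.isalnum with _ | ⟨r, rs'⟩
        · rw [hrs] at hcnt; simp at hcnt
        · exact ⟨r, rs', rfl⟩
      have hk : k < rev.length := by
        by_contra hge'
        rw [List.drop_eq_nil_of_le (by omega)] at hs
        simp at hs
      have hdropr : rev.drop k = rev[k] :: rev.drop (k + 1) := List.drop_eq_getElem_cons hk
      have hgetr : PySem.List.pyGetD rev (k : Int) ' ' = rev[k] := by
        simp [PySem.List.pyGetD_natCast, List.getD_eq_getElem?_getD, hk]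
      rw [hs] at hcnt
      simp only [List.length_cons, Nat.succ.injEq] at hcnt
      by_cases hrk : PySem.Chars.isalnum rev[k]
      · -- outer then-branch: rev[s_indx] already alnum
        have hs' : rev[k] = r ∧ (rev.drop (k + 1)).filter PySem.Chars.isalnum = rs' := by
          rw [hdropr, List.filter_cons, if_pos hrk] at hs
          exact ⟨(List.cons.injEq _ _ _ _ ▸ hs).1, (List.cons.injEq _ _ _ _ ▸ hs).2⟩
        simp only [pvOuterA, hgetl, hc, not_true, if_false, hgetr, hrk, if_true, hcast]
        rw [hs'.1, pvOuterA_spec l rev hlen (i + 1) (k + 1) (res ++ [r]) (by omega)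
          (by rw [hs'.2]; omega)]
        rw [hs'.2, hdropl, hs]
        simp [pvFill, hc]
      · -- outer else-branch: inner skip loop
        rw [hdropr, List.filter_cons, if_neg (by simp [hrk])] at hs
        obtain ⟨k', hstep, hf⟩ := pvInnerA_spec rev (k + 1) res r rs' hs
        simp only [pvOuterA, hgetl, hc, not_true, if_false, hgetr, hrk, Bool.false_eq_true]
        have hkcast : ((k : Int) + 1) = ((k + 1 : Nat) : Int) := by push_cast; ring
        have hinner :
            pvInnerA rev (PySem.List.pyRange (k : Int) ((l.length : Nat) : Int) 1) k res
              = (res ++ [r], k') := by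
          rw [← hlen, PySem.List.pyRange_one_cons (by exact_mod_cast hk)]
          simp only [pvInnerA, hgetr, hrk, Bool.false_eq_true, if_false, hkcast]
          exact hstep
        rw [hinner,
          show ((res ++ [r], k').2 : Nat) = k' from rfl,
          show ((res ++ [r], k') : List Char × Nat).1 = res ++ [r] from rfl, hcast]
        rw [pvOuterA_spec l rev hlen (i + 1) k' (res ++ [r]) (by omega) (by rw [hf]; omega)]
        rw [hf, hdropl, hdropr, List.filter_cons, if_neg (by simp [hrk]), hs]
        simp [pvFill, hc]
    · -- non-alnum position: copied through
      simp only [pvOuterA, hgetl, hc, not_false_iff, if_true, hcast, Bool.false_eq_true]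
      rw [pvOuterA_spec l rev hlen (i + 1) k (res ++ [l[i]]) (by omega)
        (by rw [hcnt, hdropl, List.filter_cons, if_neg (by simp [hc])])]
      rw [hdropl]
      simp [pvFill, hc]
  · rw [PySem.List.pyRange_one_eq_nil (by exact_mod_cast hge),
      List.drop_eq_nil_of_le hge]
    simp [pvOuterA, pvFill]
termination_by i _ _ => l.length - i

-- ===== VERDICT (by name: the statement is the Claim_ definition above) =====
theorem rev_alpha_numeric_spec : Claim_equal_rev_alpha_numeric := by
  intro s _
  simp only [Spec_rev_alpha_numeric, rev_alpha_numeric, rev_alpha_numeric_alt]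
  rw [PySem.List.slice?_none_none_neg_one s.toList]
  simp only [Option.getD_some]
  have hlen : PySem.Str.len s = ((s.toList.length : Nat) : Int) := by
    simp [PySem.Str.len_eq]
  rw [hlen]
  have h0 : ((0 : Nat) : Int) = (0 : Int) := rfl
  rw [← h0,
    pvOuterA_spec s.toList s.toList.reverse (by simp) 0 0 [] (by omega)
      (by simp [List.filter_reverse])]
  simp [List.filter_reverse]
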